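-- pv_equiv track=rewrite | github.com/skybluenada/ks78_algo | 2021 March/2021.03.05 완전탐색/kakaru_모의고사.py | solution
-- ===== SOURCE A (Python) =====
-- def solution(answers):
--     answer = []
--     supo1 = [1,2,3,4,5]
--     supo2 = [2,1,2,3,2,4,2,5]
--     supo3 = [3,3,1,1,2,2,4,4,5,5,3,3,1,1,2,2]
--     cnt =[0,0,0]
--     for i in range(len(answers)):
--         if answers[i]==supo1[(i%5)]:
--             cnt[0]+=1
--         if answers[i]==supo2[(i%8)]:
--             cnt[1]+=1
--         if answers[i]==supo3[(i%10)]: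
--             cnt[2]+=1
--
--     for i in range(3):
--         if cnt[i]==max(cnt):
--             answer.append(i+1)
--     return answer
-- ===== SOURCE B (Python) =====
-- def solution(answers):
--     pats = ([1, 2, 3, 4, 5], [2, 1, 2, 3, 2, 4, 2, 5], [3, 3, 1, 1, 2, 2, 4, 4, 5, 5])
--     # one pass: histogram of answers keyed by (position mod 40, value); 40 = lcm of the
--     # pattern periods, so each pattern's score is a fixed 40-term lookup into the table.
--     hist = {}
--     for i, a in enumerate(answers):
--         key = (i % 40, a)
--         hist[key] = hist.get(key, 0) + 1
--     cnt = [sum(hist.get((r, pat[r % len(pat)]), 0) for r in range(40)) for pat in pats]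
--     best = max(cnt)
--     return [k + 1 for k in range(3) if cnt[k] == best]
-- ===== Notes on version B (the rewrite author's own statement) =====
-- stated objective: alternative
-- what changed: A's single interleaved loop that mod-indexes each pattern per element and updates three counters is replaced by a histogram-based algorithm: one pass builds a dict counting answers by (index mod 40, value) (40 = lcm of the pattern periods), then each pattern's score is a fixed 40-term table lookup sum, followed by max/filter selection.
import Mathlib
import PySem

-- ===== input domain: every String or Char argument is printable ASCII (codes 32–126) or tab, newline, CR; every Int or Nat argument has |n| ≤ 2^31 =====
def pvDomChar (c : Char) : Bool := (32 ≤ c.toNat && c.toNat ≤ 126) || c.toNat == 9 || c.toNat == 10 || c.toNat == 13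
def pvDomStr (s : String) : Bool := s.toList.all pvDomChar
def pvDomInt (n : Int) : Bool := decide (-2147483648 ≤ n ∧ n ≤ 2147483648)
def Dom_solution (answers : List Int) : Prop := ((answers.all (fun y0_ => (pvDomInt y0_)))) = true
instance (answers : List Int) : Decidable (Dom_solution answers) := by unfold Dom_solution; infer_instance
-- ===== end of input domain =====

-- B replaces A's interleaved per-element mod-indexed counting by a (index mod 40, value)
-- histogram dict built in one pass, with each score a fixed 40-term table-lookup sum
-- (objective: alternative algorithm/data structure, same cost).

-- ===== PORT A =====
-- A's index loop 'for i in range(len(answers)): … answers[i] …' is ported as a fold over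
-- enumerate (index, element) pairs with the same three-counter state; pattern lookups
-- supoK[i % m] are PySem.List.pyGetD / PySem.Int.mod (always in range, so exact).
def solution (answers : List Int) : List Int :=
  let supo1 : List Int := [1,2,3,4,5]
  let supo2 : List Int := [2,1,2,3,2,4,2,5]
  let supo3 : List Int := [3,3,1,1,2,2,4,4,5,5,3,3,1,1,2,2]
  let c :=
    (PySem.List.enumerate answers 0).foldl
      (fun (c : Int × Int × Int) p =>
        let c := if p.2 = PySem.List.pyGetD supo1 (PySem.Int.mod p.1 5) 0 then (c.1 + 1, c.2.1, c.2.2) else c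
        let c := if p.2 = PySem.List.pyGetD supo2 (PySem.Int.mod p.1 8) 0 then (c.1, c.2.1 + 1, c.2.2) else c
        let c := if p.2 = PySem.List.pyGetD supo3 (PySem.Int.mod p.1 10) 0 then (c.1, c.2.1, c.2.2 + 1) else c
        c)
      (0, 0, 0)
  let cnt : List Int := [c.1, c.2.1, c.2.2]
  (PySem.List.pyRange 0 3 1).foldl
    (fun ans i => if PySem.List.pyGetD cnt i 0 = ((PySem.List.max? cnt (fun x => x)).getD 0) then ans ++ [i + 1] else ans)
    []

-- ===== PORT B =====
-- Source B's histogram loop: hist[(i % 40, a)] = hist.get((i % 40, a), 0) + 1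
def pvHist (answers : List Int) : PySem.Dict (Int × Int) Int :=
  (PySem.List.enumerate answers 0).foldl
    (fun d p =>
      d.insert (PySem.Int.mod p.1 40, p.2) (d.getD (PySem.Int.mod p.1 40, p.2) 0 + 1))
    PySem.Dict.empty

-- Source B's 'sum(hist.get((r, pat[r % len(pat)]), 0) for r in range(40))'
def pvScore (hist : PySem.Dict (Int × Int) Int) (pat : List Int) : Int :=
  ((PySem.List.pyRange 0 40 1).map
    (fun r => hist.getD (r, PySem.List.pyGetD pat (PySem.Int.mod r (pat.length : Int)) 0) 0)).sum

def solution_alt (answers : List Int) : List Int :=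
  let hist := pvHist answers
  let cnt : List Int :=
    [pvScore hist [1,2,3,4,5],
     pvScore hist [2,1,2,3,2,4,2,5],
     pvScore hist [3,3,1,1,2,2,4,4,5,5]]
  let best := ((PySem.List.max? cnt (fun x => x)).getD 0)
  ((PySem.List.pyRange 0 3 1).filter (fun k => PySem.List.pyGetD cnt k 0 = best)).map (· + 1)

-- ===== PRECONDITION & SPEC =====
def Spec_solution (answers : List Int) (out : List Int) : Prop := out = solution_alt answers
instance (answers : List Int) (out : List Int) : Decidable (Spec_solution answers out) := by unfold Spec_solution; infer_instance

-- ===== CLAIM (what is proved, stated in full; the proofs are below) =====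
def Claim_equal_solution : Prop := ∀ (answers : List Int), Dom_solution answers → Spec_solution answers (solution answers)

-- ===== LEMMAS AND PROOFS =====

-- A's 16-element supo3 agrees with its 10-element period on every index i % 10 can produce.
lemma pvSupo3_agree (j : Int) (h0 : 0 ≤ j) (h1 : j < 10) :
    PySem.List.pyGetD ([3,3,1,1,2,2,4,4,5,5,3,3,1,1,2,2] : List Int) j 0
      = PySem.List.pyGetD ([3,3,1,1,2,2,4,4,5,5] : List Int) j 0 := by
  interval_cases j <;> decide

-- A's interleaved fold computes, component-wise, the three indicator sums over enumerate.
lemma pvLoop_eq (l : List (Int × Int)) : ∀ (c0 c1 c2 : Int),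
    l.foldl
      (fun (c : Int × Int × Int) p =>
        let c := if p.2 = PySem.List.pyGetD ([1,2,3,4,5] : List Int) (PySem.Int.mod p.1 5) 0 then (c.1 + 1, c.2.1, c.2.2) else c
        let c := if p.2 = PySem.List.pyGetD ([2,1,2,3,2,4,2,5] : List Int) (PySem.Int.mod p.1 8) 0 then (c.1, c.2.1 + 1, c.2.2) else c
        let c := if p.2 = PySem.List.pyGetD ([3,3,1,1,2,2,4,4,5,5,3,3,1,1,2,2] : List Int) (PySem.Int.mod p.1 10) 0 then (c.1, c.2.1, c.2.2 + 1) else c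
        c)
      (c0, c1, c2)
    = (c0 + (l.map (fun p => if p.2 = PySem.List.pyGetD ([1,2,3,4,5] : List Int) (PySem.Int.mod p.1 5) 0 then (1 : Int) else 0)).sum,
       c1 + (l.map (fun p => if p.2 = PySem.List.pyGetD ([2,1,2,3,2,4,2,5] : List Int) (PySem.Int.mod p.1 8) 0 then (1 : Int) else 0)).sum,
       c2 + (l.map (fun p => if p.2 = PySem.List.pyGetD ([3,3,1,1,2,2,4,4,5,5] : List Int) (PySem.Int.mod p.1 10) 0 then (1 : Int) else 0)).sum) := by
  induction l with
  | nil => intro c0 c1 c2; simp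
  | cons p l ih =>
      intro c0 c1 c2
      have h3 : PySem.List.pyGetD ([3,3,1,1,2,2,4,4,5,5,3,3,1,1,2,2] : List Int) (PySem.Int.mod p.1 10) 0
          = PySem.List.pyGetD ([3,3,1,1,2,2,4,4,5,5] : List Int) (PySem.Int.mod p.1 10) 0 :=
        pvSupo3_agree _ (PySem.Int.mod_nonneg (a := p.1) (b := 10) (by omega)) (PySem.Int.mod_lt (a := p.1) (b := 10) (by omega))
      simp only [List.foldl_cons, List.map_cons, List.sum_cons]
      rw [h3]
      split_ifs <;> rw [ih] <;> refine Prod.ext ?_ (Prod.ext ?_ ?_) <;> ring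

-- a pair with first component outside L contributes nothing to the indicator sum over L
lemma pvSum_not_mem (f : Int → Int) (x : Int × Int) (L : List Int) (h : x.1 ∉ L) :
    (L.map (fun r => if x = (r, f r) then (1 : Int) else 0)).sum = 0 := by
  induction L with
  | nil => simp
  | cons a L ih =>
      simp only [List.mem_cons, not_or] at h
      simp only [List.map_cons, List.sum_cons, ih h.2]
      have : x ≠ (a, f a) := fun he => h.1 (by rw [he])
      simp [this]

-- over a nodup list containing x.1, the indicator sum is the single matching term
lemma pvSum_indicator (f : Int → Int) (x : Int × Int) (L : List Int)
    (hmem : x.1 ∈ L) (hnd : L.Nodup) :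
    (L.map (fun r => if x = (r, f r) then (1 : Int) else 0)).sum
      = if x.2 = f x.1 then 1 else 0 := by
  induction L with
  | nil => cases hmem
  | cons a L ih =>
      simp only [List.map_cons, List.sum_cons]
      rcases List.mem_cons.mp hmem with h1 | h1
      · subst h1
        rw [pvSum_not_mem f x L (by simpa using (List.nodup_cons.mp hnd).1)]
        by_cases h2 : x.2 = f x.1
        · have : x = (x.1, f x.1) := by rw [← h2]
          simp [← this, h2]
        · have : x ≠ (x.1, f x.1) := fun he => h2 (congrArg Prod.snd he)
          simp [this, h2]
      · have hne : x.1 ≠ a := fun he => (List.nodup_cons.mp hnd).1 (he ▸ h1)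
        have : x ≠ (a, f a) := fun he => hne (congrArg Prod.fst he)
        rw [ih h1 (List.nodup_cons.mp hnd).2]
        simp [this]

-- summing per-residue counts of (r, f r) over range(40) = summing the per-pair indicator,
-- for any pair list whose first components lie in [0, 40)
lemma pvCount_sum (f : Int → Int) (q : List (Int × Int))
    (h : ∀ p ∈ q, 0 ≤ p.1 ∧ p.1 < 40) :
    ((PySem.List.pyRange 0 40 1).map (fun r => (q.count (r, f r) : Int))).sum
      = (q.map (fun p => if p.2 = f p.1 then (1 : Int) else 0)).sum := by
  induction q with
  | nil => simp
  | cons x q ih =>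
      have hx := h x (List.mem_cons_self)
      have step : ∀ r : Int, ((List.count (r, f r) (x :: q) : Int))
          = (q.count (r, f r) : Int) + (if x = (r, f r) then 1 else 0) := by
        intro r
        rw [List.count_cons]
        by_cases hxr : x = (r, f r) <;> simp [hxr]
      simp only [step]
      rw [PySem.List.sum_map_add_int, ih (fun p hp => h p (List.mem_cons_of_mem _ hp)),
        pvSum_indicator f x (PySem.List.pyRange 0 40 1)
          (PySem.List.mem_pyRange_one.mpr ⟨hx.1, hx.2⟩) (by decide)]
      simp only [List.map_cons, List.sum_cons]
      ring

-- the histogram lookup sum equals A's indicator sum, for each period m ∈ {5, 8, 10}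
lemma pvScore_eq (answers : List Int) (pat : List Int) (m : Int)
    (hm : (pat.length : Int) = m) (hdvd : m ∣ 40) (hpos : 0 < m) :
    pvScore (pvHist answers) pat
      = ((PySem.List.enumerate answers 0).map
          (fun p => if p.2 = PySem.List.pyGetD pat (PySem.Int.mod p.1 m) 0 then (1 : Int) else 0)).sum := by
  have hd : pvHist answers
      = PySem.Dict.counter ((PySem.List.enumerate answers 0).map (fun p => (PySem.Int.mod p.1 40, p.2))) := by
    unfold pvHist
    rw [← PySem.Dict.foldl_insert_getD_add_one_eq_counter, List.foldl_map]
  have hhist : ∀ k, (pvHist answers).getD k 0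
      = (((PySem.List.enumerate answers 0).map (fun p => (PySem.Int.mod p.1 40, p.2))).count k : Int) := by
    intro k
    rw [hd, PySem.Dict.getD_counter]
  unfold pvScore
  simp only [hhist, hm]
  rw [pvCount_sum (fun r => PySem.List.pyGetD pat (PySem.Int.mod r m) 0)
      (((PySem.List.enumerate answers 0)).map (fun p => (PySem.Int.mod p.1 40, p.2)))
      (by
        intro p hp
        rcases List.mem_map.mp hp with ⟨x, _, rfl⟩
        refine ⟨?_, ?_⟩ <;> dsimp only
        · exact PySem.Int.mod_nonneg _ (by omega)
        · exact PySem.Int.mod_lt _ (by omega))]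
  rw [List.map_map]
  refine congrArg List.sum (List.map_congr_left ?_)
  intro p hp
  simp only [Function.comp_apply]
  rw [PySem.Int.mod_eq_emod_of_pos (show (0 : Int) < 40 by omega),
    PySem.Int.mod_eq_emod_of_pos hpos, Int.emod_emod_of_dvd p.1 hdvd,
    ← PySem.Int.mod_eq_emod_of_pos hpos]

-- the selection step: A's append-fold over [0,1,2] equals B's filter-map, for any cnt.
lemma pvSel_eq (cnt : List Int) :
    (PySem.List.pyRange 0 3 1).foldl
      (fun ans i => if PySem.List.pyGetD cnt i 0 = ((PySem.List.max? cnt (fun x => x)).getD 0) then ans ++ [i + 1] else ans)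
      []
    = ((PySem.List.pyRange 0 3 1).filter
        (fun i => PySem.List.pyGetD cnt i 0 = ((PySem.List.max? cnt (fun x => x)).getD 0))).map (· + 1) := by
  have hr : PySem.List.pyRange 0 3 1 = [0, 1, 2] := by decide
  rw [hr]
  simp only [List.foldl_cons, List.foldl_nil, List.filter]
  split_ifs <;> simp_all

-- ===== VERDICT (by name: the statement is the Claim_ definition above) =====
theorem solution_spec : Claim_equal_solution := by
  intro answers _
  show solution answers = solution_alt answers
  simp only [solution, solution_alt]
  rw [pvLoop_eq]
  simp only [zero_add]
  rw [pvScore_eq answers [1,2,3,4,5] 5 (by decide) (by decide) (by decide),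
    pvScore_eq answers [2,1,2,3,2,4,2,5] 8 (by decide) (by decide) (by decide),
    pvScore_eq answers [3,3,1,1,2,2,4,4,5,5] 10 (by decide) (by decide) (by decide)]
  exact pvSel_eq _
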